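-- pv_equiv track=rewrite | github.com/wuhusie/SCE-Bench | analysis/expN50/run_N50.py | process_profile
-- ===== SOURCE A (Python) =====
-- def process_profile(text):
--     """Convert second-person profile to third-person."""
--     replace_map = [
--         ("Your", "The participant's"),
--         ("You live", "The participant lives"),
--         ("You don't own", "The participant does not own"),
--         ("You are", "The participant is"),
--         ("You have", "The participant has"),
--         ("You", "The participant")
--     ]
--     for old, new in replace_map:
--         text = text.replace(old, new)
--     return text
-- ===== SOURCE B (Python) =====
-- def process_profile(text):
--     """Convert second-person profile to third-person (single left-to-right scan)."""
--     out = []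
--     i = 0
--     n = len(text)
--     while i < n:
--         if text.startswith("Your", i):
--             out.append("The participant's")
--             i += 4
--         elif text.startswith("You live", i):
--             out.append("The participant lives")
--             i += 8
--         elif text.startswith("You don't own", i):
--             out.append("The participant does not own")
--             i += 13
--         elif text.startswith("You are", i):
--             out.append("The participant is")
--             i += 7
--         elif text.startswith("You have", i):
--             out.append("The participant has")
--             i += 8
--         elif text.startswith("You", i):
--             out.append("The participant")
--             i += 3
--         else:
--             out.append(text[i])
--             i += 1
--     return "".join(out)
-- ===== Notes on version B (the rewrite author's own statement) =====
-- stated objective: alternative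
-- what changed: Replaces the six sequential full-string str.replace passes with a single left-to-right scan that tries the six patterns in the same priority order at each position and emits the replacement (or the character) once.
import Mathlib
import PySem

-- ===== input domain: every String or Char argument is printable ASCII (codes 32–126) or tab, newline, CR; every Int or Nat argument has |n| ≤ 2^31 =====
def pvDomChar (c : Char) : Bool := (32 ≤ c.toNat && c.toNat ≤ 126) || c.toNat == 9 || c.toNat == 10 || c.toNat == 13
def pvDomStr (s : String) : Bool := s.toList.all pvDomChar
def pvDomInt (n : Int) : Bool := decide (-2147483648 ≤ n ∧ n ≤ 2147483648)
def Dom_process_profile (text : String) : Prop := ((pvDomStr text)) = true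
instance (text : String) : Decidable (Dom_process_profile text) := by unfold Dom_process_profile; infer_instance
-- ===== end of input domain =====

-- B replaces A's six sequential str.replace passes by one left-to-right scan trying the
-- patterns in the same priority order at each position (objective: alternative algorithm).

-- ===== PORT A =====
def replaceMap : List (String × String) :=
  [("Your", "The participant's"),
   ("You live", "The participant lives"),
   ("You don't own", "The participant does not own"),
   ("You are", "The participant is"),
   ("You have", "The participant has"),
   ("You", "The participant")]

def process_profile (text : String) : String :=
  replaceMap.foldl (fun t p => PySem.Str.replace t p.1 p.2) text

-- ===== PORT B =====
-- pattern/replacement constants of Source B, as char lists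
def pvP1 : List Char := ['Y','o','u','r']
def pvP2 : List Char := ['Y','o','u',' ','l','i','v','e']
def pvP3 : List Char := ['Y','o','u',' ','d','o','n','\'','t',' ','o','w','n']
def pvP4 : List Char := ['Y','o','u',' ','a','r','e']
def pvP5 : List Char := ['Y','o','u',' ','h','a','v','e']
def pvP6 : List Char := ['Y','o','u']
def pvR1 : List Char := "The participant's".toList
def pvR2 : List Char := "The participant lives".toList
def pvR3 : List Char := "The participant does not own".toList
def pvR4 : List Char := "The participant is".toList
def pvR5 : List Char := "The participant has".toList
def pvR6 : List Char := "The participant".toList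

-- the single left-to-right scan of Source B's while loop
def scanB (cs : List Char) : List Char :=
  if h1 : pvP1 <+: cs then pvR1 ++ scanB (cs.drop 4)
  else if h2 : pvP2 <+: cs then pvR2 ++ scanB (cs.drop 8)
  else if h3 : pvP3 <+: cs then pvR3 ++ scanB (cs.drop 13)
  else if h4 : pvP4 <+: cs then pvR4 ++ scanB (cs.drop 7)
  else if h5 : pvP5 <+: cs then pvR5 ++ scanB (cs.drop 8)
  else if h6 : pvP6 <+: cs then pvR6 ++ scanB (cs.drop 3)
  else
    match cs with
    | [] => []
    | c :: t => c :: scanB t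
termination_by cs.length
decreasing_by
  · have h := h1.length_le; simp only [pvP1, List.length_cons, List.length_nil] at h
    simp only [List.length_drop]; omega
  · have h := h2.length_le; simp only [pvP2, List.length_cons, List.length_nil] at h
    simp only [List.length_drop]; omega
  · have h := h3.length_le; simp only [pvP3, List.length_cons, List.length_nil] at h
    simp only [List.length_drop]; omega
  · have h := h4.length_le; simp only [pvP4, List.length_cons, List.length_nil] at h
    simp only [List.length_drop]; omega
  · have h := h5.length_le; simp only [pvP5, List.length_cons, List.length_nil] at h
    simp only [List.length_drop]; omega
  · have h := h6.length_le; simp only [pvP6, List.length_cons, List.length_nil] at h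
    simp only [List.length_drop]; omega
  · simp

def process_profile_alt (text : String) : String :=
  String.ofList (scanB text.toList)

-- ===== PRECONDITION & SPEC =====
def Spec_process_profile (text : String) (out : String) : Prop := out = process_profile_alt text
instance (text : String) (out : String) : Decidable (Spec_process_profile text out) := by unfold Spec_process_profile; infer_instance

-- ===== CLAIM (what is proved, stated in full; the proofs are below) =====
def Claim_equal_process_profile : Prop := ∀ (text : String), Dom_process_profile text → Spec_process_profile text (process_profile text)

-- ===== LEMMAS AND PROOFS =====

-- clean recursive reformulation of PySem.Chars.replace (for nonempty old)
def myrep (old new : List Char) (s : List Char) : List Char :=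
  if h : old ≠ [] ∧ old <+: s then new ++ myrep old new (s.drop old.length) else
    match s with
    | [] => []
    | c :: t => c :: myrep old new t
termination_by s.length
decreasing_by
  · have h1 := h.2.length_le
    have h2 : 0 < old.length := List.length_pos_of_ne_nil h.1
    simp only [List.length_drop]; omega
  · simp

theorem myrep_nil (old new : List Char) : myrep old new [] = [] := by
  rw [myrep]; simp

theorem myrep_match (old new : List Char) (hne : old ≠ []) (u : List Char) :
    myrep old new (old ++ u) = new ++ myrep old new u := by
  rw [myrep, dif_pos ⟨hne, List.prefix_append _ _⟩, List.drop_left]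

theorem myrep_cons_guard (old new : List Char) (c : Char) (t : List Char)
    (h : ¬ (old ≠ [] ∧ old <+: c :: t)) : myrep old new (c :: t) = c :: myrep old new t := by
  rw [myrep, dif_neg h]

-- a block whose characters never equal old's head letter passes through unchanged
theorem myrep_skip (old new : List Char) (a : List Char)
    (ha : ∀ c ∈ a, old.head? ≠ some c) :
    ∀ u, myrep old new (a ++ u) = a ++ myrep old new u := by
  induction a with
  | nil => intro u; simp
  | cons c a' ih =>
    intro u
    have hnp : ¬ (old ≠ [] ∧ old <+: c :: (a' ++ u)) := by
      rintro ⟨hne, hpre⟩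
      cases old with
      | nil => exact hne rfl
      | cons d o'' =>
        rw [List.cons_prefix_cons] at hpre
        exact ha c (List.mem_cons_self ..) (by rw [hpre.1]; rfl)
    rw [List.cons_append, myrep_cons_guard _ _ _ _ hnp,
      ih (fun c hm => ha c (List.mem_cons_of_mem _ hm)), List.cons_append]

-- a nonempty block passes through when old matches neither at its start nor inside it
theorem myrep_pass_block (old new p : List Char) (x : List Char)
    (h0 : ¬ (old ≠ [] ∧ old <+: p ++ x))
    (ht : ∀ d ∈ p.tail, old.head? ≠ some d) (hne : p ≠ []) :
    myrep old new (p ++ x) = p ++ myrep old new x := by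
  cases p with
  | nil => exact absurd rfl hne
  | cons c t =>
    rw [List.cons_append, myrep_cons_guard _ _ _ _ (by simpa using h0),
      myrep_skip _ _ t (by simpa using ht), List.cons_append]

-- a prefix not containing the replacement's head letter must already be a prefix of the input
theorem prefix_of_myrep (g : Char) (news old : List Char) :
    ∀ (s u : List Char), (∀ c ∈ s, c ≠ g) → s <+: myrep old (g :: news) u → s <+: u := by
  suffices H : ∀ (n : Nat) (s u : List Char), u.length ≤ n → (∀ c ∈ s, c ≠ g) →
      s <+: myrep old (g :: news) u → s <+: u from
    fun s u hs hp => H u.length s u le_rfl hs hp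
  intro n
  induction n with
  | zero =>
    intro s u hu hs hp
    have : u = [] := List.eq_nil_of_length_eq_zero (Nat.le_zero.mp hu)
    subst this
    rw [myrep_nil] at hp
    simpa using hp
  | succ n ih =>
    intro s u hu hs hp
    by_cases hm : old ≠ [] ∧ old <+: u
    · rw [myrep, dif_pos hm] at hp
      cases s with
      | nil => exact List.nil_prefix
      | cons d s' =>
        rw [List.cons_append, List.cons_prefix_cons] at hp
        exact absurd hp.1 (hs d (List.mem_cons_self ..))
    · cases u with
      | nil =>
        rw [myrep_nil] at hp
        simpa using hp
      | cons c t =>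
        rw [myrep_cons_guard _ _ _ _ hm] at hp
        cases s with
        | nil => exact List.nil_prefix
        | cons d s' =>
          rw [List.cons_prefix_cons] at hp
          obtain ⟨rfl, hp'⟩ := hp
          have := ih s' t (by simpa using Nat.lt_succ_iff.mp (by simpa using hu))
            (fun c hm => hs c (List.mem_cons_of_mem _ hm)) hp'
          exact List.cons_prefix_cons.mpr ⟨rfl, this⟩

-- PySem.Chars.replace.go equals myrep
theorem go_eq_myrep (old new : List Char) (hne : old ≠ []) :
    ∀ (fuel : Nat) (l acc : List Char), l.length ≤ fuel →
      PySem.Chars.replace.go old new fuel l acc = acc.reverse ++ myrep old new l := by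
  intro fuel
  induction fuel with
  | zero =>
    intro l acc hl
    have : l = [] := List.eq_nil_of_length_eq_zero (Nat.le_zero.mp hl)
    subst this
    rw [PySem.Chars.replace.go]
    simp [myrep_nil]
  | succ fuel ih =>
    intro l acc hl
    cases l with
    | nil =>
      rw [PySem.Chars.replace.go]
      all_goals simp [myrep_nil]
    | cons c t =>
      rw [PySem.Chars.replace.go]
      by_cases hp : old <+: c :: t
      · rw [if_pos (List.isPrefixOf_iff_prefix.mpr hp)]
        obtain ⟨u, hu⟩ := hp
        rw [← hu, List.drop_left, myrep_match old new hne u]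
        rw [ih u _ (by
          have h2 : 0 < old.length := List.length_pos_of_ne_nil hne
          have h3 : (old ++ u).length ≤ fuel + 1 := hu ▸ hl
          simp only [List.length_append] at h3
          omega)]
        simp
      · rw [if_neg (fun hb => hp (List.isPrefixOf_iff_prefix.mp hb))]
        rw [ih _ _ (by simp only [List.length_cons] at hl; omega)]
        rw [myrep_cons_guard _ _ _ _ (by tauto)]
        simp

theorem str_replace_eq (s o n : String) (hne : o.toList ≠ []) :
    PySem.Str.replace s o n = String.ofList (myrep o.toList n.toList s.toList) := by
  unfold PySem.Str.replace PySem.Chars.replace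
  rw [if_neg (by simpa using hne)]
  rw [go_eq_myrep _ _ hne _ _ _ le_rfl]
  simp

-- the whole chain of A's six replaces
def ACh (cs : List Char) : List Char :=
  myrep pvP6 pvR6 (myrep pvP5 pvR5 (myrep pvP4 pvR4 (myrep pvP3 pvR3
    (myrep pvP2 pvR2 (myrep pvP1 pvR1 cs)))))

theorem ACh1 (u : List Char) : ACh (pvP1 ++ u) = pvR1 ++ ACh u := by
  unfold ACh
  rw [myrep_match pvP1 pvR1 (by simp [pvP1]) u,
    myrep_skip pvP2 pvR2 pvR1 (by simp [pvP2, pvR1]),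
    myrep_skip pvP3 pvR3 pvR1 (by simp [pvP3, pvR1]),
    myrep_skip pvP4 pvR4 pvR1 (by simp [pvP4, pvR1]),
    myrep_skip pvP5 pvR5 pvR1 (by simp [pvP5, pvR1]),
    myrep_skip pvP6 pvR6 pvR1 (by simp [pvP6, pvR1])]

theorem ACh2 (u : List Char) : ACh (pvP2 ++ u) = pvR2 ++ ACh u := by
  unfold ACh
  rw [myrep_pass_block pvP1 pvR1 pvP2 u
      (by rintro ⟨-, hpre⟩; simp [pvP1, pvP2, List.cons_prefix_cons] at hpre)
      (by simp [pvP1, pvP2]) (by simp [pvP2]),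
    myrep_match pvP2 pvR2 (by simp [pvP2]),
    myrep_skip pvP3 pvR3 pvR2 (by simp [pvP3, pvR2]),
    myrep_skip pvP4 pvR4 pvR2 (by simp [pvP4, pvR2]),
    myrep_skip pvP5 pvR5 pvR2 (by simp [pvP5, pvR2]),
    myrep_skip pvP6 pvR6 pvR2 (by simp [pvP6, pvR2])]

theorem ACh3 (u : List Char) : ACh (pvP3 ++ u) = pvR3 ++ ACh u := by
  unfold ACh
  rw [myrep_pass_block pvP1 pvR1 pvP3 u
      (by rintro ⟨-, hpre⟩; simp [pvP1, pvP3, List.cons_prefix_cons] at hpre)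
      (by simp [pvP1, pvP3]) (by simp [pvP3]),
    myrep_pass_block pvP2 pvR2 pvP3 _
      (by rintro ⟨-, hpre⟩; simp [pvP2, pvP3, List.cons_prefix_cons] at hpre)
      (by simp [pvP2, pvP3]) (by simp [pvP3]),
    myrep_match pvP3 pvR3 (by simp [pvP3]),
    myrep_skip pvP4 pvR4 pvR3 (by simp [pvP4, pvR3]),
    myrep_skip pvP5 pvR5 pvR3 (by simp [pvP5, pvR3]),
    myrep_skip pvP6 pvR6 pvR3 (by simp [pvP6, pvR3])]

theorem ACh4 (u : List Char) : ACh (pvP4 ++ u) = pvR4 ++ ACh u := by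
  unfold ACh
  rw [myrep_pass_block pvP1 pvR1 pvP4 u
      (by rintro ⟨-, hpre⟩; simp [pvP1, pvP4, List.cons_prefix_cons] at hpre)
      (by simp [pvP1, pvP4]) (by simp [pvP4]),
    myrep_pass_block pvP2 pvR2 pvP4 _
      (by rintro ⟨-, hpre⟩; simp [pvP2, pvP4, List.cons_prefix_cons] at hpre)
      (by simp [pvP2, pvP4]) (by simp [pvP4]),
    myrep_pass_block pvP3 pvR3 pvP4 _
      (by rintro ⟨-, hpre⟩; simp [pvP3, pvP4, List.cons_prefix_cons] at hpre)
      (by simp [pvP3, pvP4]) (by simp [pvP4]),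
    myrep_match pvP4 pvR4 (by simp [pvP4]),
    myrep_skip pvP5 pvR5 pvR4 (by simp [pvP5, pvR4]),
    myrep_skip pvP6 pvR6 pvR4 (by simp [pvP6, pvR4])]

theorem ACh5 (u : List Char) : ACh (pvP5 ++ u) = pvR5 ++ ACh u := by
  unfold ACh
  rw [myrep_pass_block pvP1 pvR1 pvP5 u
      (by rintro ⟨-, hpre⟩; simp [pvP1, pvP5, List.cons_prefix_cons] at hpre)
      (by simp [pvP1, pvP5]) (by simp [pvP5]),
    myrep_pass_block pvP2 pvR2 pvP5 _
      (by rintro ⟨-, hpre⟩; simp [pvP2, pvP5, List.cons_prefix_cons] at hpre)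
      (by simp [pvP2, pvP5]) (by simp [pvP5]),
    myrep_pass_block pvP3 pvR3 pvP5 _
      (by rintro ⟨-, hpre⟩; simp [pvP3, pvP5, List.cons_prefix_cons] at hpre)
      (by simp [pvP3, pvP5]) (by simp [pvP5]),
    myrep_pass_block pvP4 pvR4 pvP5 _
      (by rintro ⟨-, hpre⟩; simp [pvP4, pvP5, List.cons_prefix_cons] at hpre)
      (by simp [pvP4, pvP5]) (by simp [pvP5]),
    myrep_match pvP5 pvR5 (by simp [pvP5]),
    myrep_skip pvP6 pvR6 pvR5 (by simp [pvP6, pvR5])]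

-- wrapper of prefix_of_myrep keyed on the replacement's head character
theorem prefix_of_myrep' (old news : List Char) (g : Char) (s u : List Char)
    (hp : s <+: myrep old news u) (hhead : news.head? = some g)
    (hs : ∀ c ∈ s, c ≠ g) : s <+: u := by
  cases news with
  | nil => simp at hhead
  | cons a t =>
    have ha : a = g := by simpa using hhead
    subst ha
    exact prefix_of_myrep a t old s u hs hp

-- the "You" case: none of the five longer patterns matches at the front
theorem ACh6 (u : List Char)
    (n1 : ¬ ['r'] <+: u)
    (n2 : ¬ [' ','l','i','v','e'] <+: u)
    (n3 : ¬ [' ','d','o','n','\'','t',' ','o','w','n'] <+: u)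
    (n4 : ¬ [' ','a','r','e'] <+: u)
    (n5 : ¬ [' ','h','a','v','e'] <+: u) :
    ACh (pvP6 ++ u) = pvR6 ++ ACh u := by
  have step : ∀ (old news : List Char) (s u : List Char), news.head? = some 'T' →
      (∀ c ∈ s, c ≠ 'T') → ¬ s <+: u → ¬ s <+: myrep old news u :=
    fun old news s u hh hs hn hp => hn (prefix_of_myrep' old news 'T' s u hp hh hs)
  have m2 : ¬ [' ','l','i','v','e'] <+: myrep pvP1 pvR1 u :=
    step _ _ _ _ (by simp [pvR1]) (by simp) n2
  have m3 : ¬ [' ','d','o','n','\'','t',' ','o','w','n'] <+: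
      myrep pvP2 pvR2 (myrep pvP1 pvR1 u) :=
    step _ _ _ _ (by simp [pvR2]) (by simp)
      (step _ _ _ _ (by simp [pvR1]) (by simp) n3)
  have m4 : ¬ [' ','a','r','e'] <+:
      myrep pvP3 pvR3 (myrep pvP2 pvR2 (myrep pvP1 pvR1 u)) :=
    step _ _ _ _ (by simp [pvR3]) (by simp)
      (step _ _ _ _ (by simp [pvR2]) (by simp)
        (step _ _ _ _ (by simp [pvR1]) (by simp) n4))
  have m5 : ¬ [' ','h','a','v','e'] <+:
      myrep pvP4 pvR4 (myrep pvP3 pvR3 (myrep pvP2 pvR2 (myrep pvP1 pvR1 u))) :=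
    step _ _ _ _ (by simp [pvR4]) (by simp)
      (step _ _ _ _ (by simp [pvR3]) (by simp)
        (step _ _ _ _ (by simp [pvR2]) (by simp)
          (step _ _ _ _ (by simp [pvR1]) (by simp) n5)))
  unfold ACh
  rw [myrep_pass_block pvP1 pvR1 pvP6 u
      (by rintro ⟨-, hp⟩; exact n1 (by simpa [pvP1, pvP6, List.cons_prefix_cons] using hp))
      (by simp [pvP1, pvP6]) (by simp [pvP6]),
    myrep_pass_block pvP2 pvR2 pvP6 _
      (by rintro ⟨-, hp⟩; exact m2 (by simpa [pvP2, pvP6, List.cons_prefix_cons] using hp))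
      (by simp [pvP2, pvP6]) (by simp [pvP6]),
    myrep_pass_block pvP3 pvR3 pvP6 _
      (by rintro ⟨-, hp⟩; exact m3 (by simpa [pvP3, pvP6, List.cons_prefix_cons] using hp))
      (by simp [pvP3, pvP6]) (by simp [pvP6]),
    myrep_pass_block pvP4 pvR4 pvP6 _
      (by rintro ⟨-, hp⟩; exact m4 (by simpa [pvP4, pvP6, List.cons_prefix_cons] using hp))
      (by simp [pvP4, pvP6]) (by simp [pvP6]),
    myrep_pass_block pvP5 pvR5 pvP6 _
      (by rintro ⟨-, hp⟩; exact m5 (by simpa [pvP5, pvP6, List.cons_prefix_cons] using hp))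
      (by simp [pvP5, pvP6]) (by simp [pvP6]),
    myrep_match pvP6 pvR6 (by simp [pvP6])]

-- the no-match case: the head character passes all six replaces unchanged
theorem ACh0 (c : Char) (t : List Char) (h6 : ¬ pvP6 <+: c :: t) :
    ACh (c :: t) = c :: ACh t := by
  by_cases hc : c = 'Y'
  · subst hc
    have hou : ¬ ['o','u'] <+: t := by
      intro hp; exact h6 (by simp [pvP6, List.cons_prefix_cons]; exact hp)
    have step : ∀ (old news : List Char) (u : List Char), news.head? = some 'T' →
        ¬ ['o','u'] <+: u → ¬ ['o','u'] <+: myrep old news u :=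
      fun old news u hh hn hp =>
        hn (prefix_of_myrep' old news 'T' ['o','u'] u hp hh (by simp))
    have q1 : ¬ ['o','u'] <+: myrep pvP1 pvR1 t := step _ _ _ (by simp [pvR1]) hou
    have q2 : ¬ ['o','u'] <+: myrep pvP2 pvR2 (myrep pvP1 pvR1 t) :=
      step _ _ _ (by simp [pvR2]) q1
    have q3 : ¬ ['o','u'] <+: myrep pvP3 pvR3 (myrep pvP2 pvR2 (myrep pvP1 pvR1 t)) :=
      step _ _ _ (by simp [pvR3]) q2
    have q4 : ¬ ['o','u'] <+: myrep pvP4 pvR4 (myrep pvP3 pvR3 (myrep pvP2 pvR2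
        (myrep pvP1 pvR1 t))) :=
      step _ _ _ (by simp [pvR4]) q3
    have q5 : ¬ ['o','u'] <+: myrep pvP5 pvR5 (myrep pvP4 pvR4 (myrep pvP3 pvR3
        (myrep pvP2 pvR2 (myrep pvP1 pvR1 t)))) :=
      step _ _ _ (by simp [pvR5]) q4
    unfold ACh
    rw [myrep_cons_guard pvP1 pvR1 _ _ (by
        rintro ⟨-, hp⟩
        simp only [pvP1, List.cons_prefix_cons, true_and] at hp
        exact hou (List.IsPrefix.trans (by simp [List.cons_prefix_cons]) hp)),
      myrep_cons_guard pvP2 pvR2 _ _ (by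
        rintro ⟨-, hp⟩
        simp only [pvP2, List.cons_prefix_cons, true_and] at hp
        exact q1 (List.IsPrefix.trans (by simp [List.cons_prefix_cons]) hp)),
      myrep_cons_guard pvP3 pvR3 _ _ (by
        rintro ⟨-, hp⟩
        simp only [pvP3, List.cons_prefix_cons, true_and] at hp
        exact q2 (List.IsPrefix.trans (by simp [List.cons_prefix_cons]) hp)),
      myrep_cons_guard pvP4 pvR4 _ _ (by
        rintro ⟨-, hp⟩
        simp only [pvP4, List.cons_prefix_cons, true_and] at hp
        exact q3 (List.IsPrefix.trans (by simp [List.cons_prefix_cons]) hp)),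
      myrep_cons_guard pvP5 pvR5 _ _ (by
        rintro ⟨-, hp⟩
        simp only [pvP5, List.cons_prefix_cons, true_and] at hp
        exact q4 (List.IsPrefix.trans (by simp [List.cons_prefix_cons]) hp)),
      myrep_cons_guard pvP6 pvR6 _ _ (by
        rintro ⟨-, hp⟩
        simp only [pvP6, List.cons_prefix_cons, true_and] at hp
        exact q5 hp)]
  · unfold ACh
    rw [myrep_cons_guard pvP1 pvR1 _ _ (by
        rintro ⟨-, hp⟩; simp only [pvP1, List.cons_prefix_cons] at hp; exact hc hp.1.symm),
      myrep_cons_guard pvP2 pvR2 _ _ (by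
        rintro ⟨-, hp⟩; simp only [pvP2, List.cons_prefix_cons] at hp; exact hc hp.1.symm),
      myrep_cons_guard pvP3 pvR3 _ _ (by
        rintro ⟨-, hp⟩; simp only [pvP3, List.cons_prefix_cons] at hp; exact hc hp.1.symm),
      myrep_cons_guard pvP4 pvR4 _ _ (by
        rintro ⟨-, hp⟩; simp only [pvP4, List.cons_prefix_cons] at hp; exact hc hp.1.symm),
      myrep_cons_guard pvP5 pvR5 _ _ (by
        rintro ⟨-, hp⟩; simp only [pvP5, List.cons_prefix_cons] at hp; exact hc hp.1.symm),
      myrep_cons_guard pvP6 pvR6 _ _ (by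
        rintro ⟨-, hp⟩; simp only [pvP6, List.cons_prefix_cons] at hp; exact hc hp.1.symm)]

theorem ACh_eq_scanB : ∀ cs, ACh cs = scanB cs := by
  intro cs
  induction cs using scanB.induct with
  | case1 x h1 ih =>
    obtain ⟨u, rfl⟩ := h1
    rw [show (pvP1 ++ u).drop 4 = u from by simp [pvP1]] at ih
    rw [scanB]
    rw [dif_pos (List.prefix_append _ _), show (pvP1 ++ u).drop 4 = u from by simp [pvP1]]
    rw [ACh1, ih]
  | case2 x h1 h2 ih =>
    obtain ⟨u, rfl⟩ := h2
    rw [show (pvP2 ++ u).drop 8 = u from by simp [pvP2]] at ih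
    rw [scanB]
    rw [dif_neg h1, dif_pos (List.prefix_append _ _),
      show (pvP2 ++ u).drop 8 = u from by simp [pvP2]]
    rw [ACh2, ih]
  | case3 x h1 h2 h3 ih =>
    obtain ⟨u, rfl⟩ := h3
    rw [show (pvP3 ++ u).drop 13 = u from by simp [pvP3]] at ih
    rw [scanB]
    rw [dif_neg h1, dif_neg h2, dif_pos (List.prefix_append _ _),
      show (pvP3 ++ u).drop 13 = u from by simp [pvP3]]
    rw [ACh3, ih]
  | case4 x h1 h2 h3 h4 ih =>
    obtain ⟨u, rfl⟩ := h4
    rw [show (pvP4 ++ u).drop 7 = u from by simp [pvP4]] at ih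
    rw [scanB]
    rw [dif_neg h1, dif_neg h2, dif_neg h3, dif_pos (List.prefix_append _ _),
      show (pvP4 ++ u).drop 7 = u from by simp [pvP4]]
    rw [ACh4, ih]
  | case5 x h1 h2 h3 h4 h5 ih =>
    obtain ⟨u, rfl⟩ := h5
    rw [show (pvP5 ++ u).drop 8 = u from by simp [pvP5]] at ih
    rw [scanB]
    rw [dif_neg h1, dif_neg h2, dif_neg h3, dif_neg h4, dif_pos (List.prefix_append _ _),
      show (pvP5 ++ u).drop 8 = u from by simp [pvP5]]
    rw [ACh5, ih]
  | case6 x h1 h2 h3 h4 h5 h6 ih =>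
    obtain ⟨u, rfl⟩ := h6
    rw [show (pvP6 ++ u).drop 3 = u from by simp [pvP6]] at ih
    rw [scanB]
    rw [dif_neg h1, dif_neg h2, dif_neg h3, dif_neg h4, dif_neg h5,
      dif_pos (List.prefix_append _ _), show (pvP6 ++ u).drop 3 = u from by simp [pvP6]]
    rw [ACh6 u
      (by intro hp; exact h1 (by simp [pvP1, pvP6, List.cons_prefix_cons]; simpa using hp))
      (by intro hp; exact h2 (by simp [pvP2, pvP6, List.cons_prefix_cons]; simpa using hp))
      (by intro hp; exact h3 (by simp [pvP3, pvP6, List.cons_prefix_cons]; simpa using hp))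
      (by intro hp; exact h4 (by simp [pvP4, pvP6, List.cons_prefix_cons]; simpa using hp))
      (by intro hp; exact h5 (by simp [pvP5, pvP6, List.cons_prefix_cons]; simpa using hp)),
      ih]
  | case7 h1 h2 h3 h4 h5 h6 =>
    rw [scanB]
    rw [dif_neg h1, dif_neg h2, dif_neg h3, dif_neg h4, dif_neg h5, dif_neg h6]
    simp [ACh, myrep_nil]
  | case8 c t h1 h2 h3 h4 h5 h6 ih =>
    rw [scanB]
    rw [dif_neg h1, dif_neg h2, dif_neg h3, dif_neg h4, dif_neg h5, dif_neg h6]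
    rw [ACh0 c t h6, ih]

-- ===== VERDICT (by name: the statement is the Claim_ definition above) =====
theorem process_profile_spec : Claim_equal_process_profile := by
  intro text _
  show process_profile text = process_profile_alt text
  unfold process_profile replaceMap
  simp only [List.foldl_cons, List.foldl_nil]
  rw [str_replace_eq _ _ _ (by simp), str_replace_eq _ _ _ (by simp),
    str_replace_eq _ _ _ (by simp), str_replace_eq _ _ _ (by simp),
    str_replace_eq _ _ _ (by simp), str_replace_eq _ _ _ (by simp)]
  simp only [String.toList_ofList]
  rw [show ("The participant's".toList) = pvR1 from rfl,
    show ("The participant lives".toList) = pvR2 from rfl,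
    show ("The participant does not own".toList) = pvR3 from rfl,
    show ("The participant is".toList) = pvR4 from rfl,
    show ("The participant has".toList) = pvR5 from rfl,
    show ("The participant".toList) = pvR6 from rfl]
  rw [show ("Your".toList) = pvP1 from rfl, show ("You live".toList) = pvP2 from rfl,
    show ("You don't own".toList) = pvP3 from rfl, show ("You are".toList) = pvP4 from rfl,
    show ("You have".toList) = pvP5 from rfl, show ("You".toList) = pvP6 from rfl]
  rw [show ∀ cs, myrep pvP6 pvR6 (myrep pvP5 pvR5 (myrep pvP4 pvR4 (myrep pvP3 pvR3
    (myrep pvP2 pvR2 (myrep pvP1 pvR1 cs))))) = ACh cs from fun _ => rfl]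
  rw [ACh_eq_scanB]
  rfl
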